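-- pv_equiv track=rewrite | github.com/my-HenryS/ParaCrash | ParaCrash/pfs.py | locate
-- ===== SOURCE A (Python) =====
-- import math
--
-- def locate(offset, length, n, stripe_size, padding=0):
--     ret_val = []
--
--     if padding > 0:
--         # left padding
--         length += offset % padding
--         offset -= offset % padding
--
--         # right padding
--         length += padding - length % padding
--
--     while length > 0:
--         server = math.floor(offset / stripe_size) % n
--         l_off = math.floor(offset / (stripe_size * n)) * stripe_size + offset % stripe_size
--         l_length = min(stripe_size - offset % stripe_size, length)
--
--         ret_val.append((server, l_off, l_length))
--
--         length -= l_length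
--         offset += l_length
--
--     return ret_val
-- ===== SOURCE B (Python) =====
-- def locate(offset, length, n, stripe_size, padding=0):
--     if padding > 0:
--         r = offset % padding
--         length += r
--         offset -= r
--         length += padding - length % padding
--
--     if length <= 0:
--         return []
--
--     first = offset // stripe_size
--     last = (offset + length - 1) // stripe_size
--     ret_val = []
--     for s in range(first, last + 1):
--         g = max(offset, s * stripe_size)
--         e = min(offset + length, (s + 1) * stripe_size)
--         ret_val.append((s % n,
--                         (g // (stripe_size * n)) * stripe_size + g % stripe_size,
--                         e - g))
--     return ret_val
-- ===== Notes on version B (the rewrite author's own statement) =====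
-- stated objective: alternative
-- what changed: Replaces the while loop that threads a mutating offset/length pair with a closed-form computation of the stripe index range (first..last) and a per-stripe-index loop deriving each chunk's boundaries directly from the original offset/length by max/min with the stripe boundaries; no decrementing accumulator is maintained.
import Mathlib
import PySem

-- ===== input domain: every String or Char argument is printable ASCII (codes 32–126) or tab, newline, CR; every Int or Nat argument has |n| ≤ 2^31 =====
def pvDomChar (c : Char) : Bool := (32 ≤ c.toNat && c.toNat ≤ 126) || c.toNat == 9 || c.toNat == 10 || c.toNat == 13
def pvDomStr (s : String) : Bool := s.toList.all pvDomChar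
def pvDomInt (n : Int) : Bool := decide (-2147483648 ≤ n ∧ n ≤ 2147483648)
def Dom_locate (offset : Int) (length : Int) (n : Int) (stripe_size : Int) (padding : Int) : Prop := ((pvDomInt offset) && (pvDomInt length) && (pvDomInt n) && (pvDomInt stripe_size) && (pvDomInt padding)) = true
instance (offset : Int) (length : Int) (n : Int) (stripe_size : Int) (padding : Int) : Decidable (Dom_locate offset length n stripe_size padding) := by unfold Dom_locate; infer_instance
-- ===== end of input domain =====

-- B replaces A's offset/length-mutating while loop by a closed-form stripe-index range
-- and derives each chunk from its stripe index (objective: alternative decomposition).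
-- Within Dom (|ints| ≤ 2^31) Python's math.floor(x / y) equals integer floor division,
-- so both ports use PySem.Int.floordiv.

-- ===== PORT A =====
-- fuel = length.toNat is only a totality device: inside Pre_ each iteration
-- consumes at least 1 of length, so the fuel never runs out.
def locateLoop (n stripe_size : Int) : Nat → Int → Int → List (Int × Int × Int)
  | 0, _, _ => []
  | fuel + 1, offset, length =>
    if length > 0 then
      let server := PySem.Int.mod (PySem.Int.floordiv offset stripe_size) n
      let l_off := (PySem.Int.floordiv offset (stripe_size * n)) * stripe_size + PySem.Int.mod offset stripe_size
      let l_length := min (stripe_size - PySem.Int.mod offset stripe_size) length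
      (server, l_off, l_length) :: locateLoop n stripe_size fuel (offset + l_length) (length - l_length)
    else []

def locate (offset : Int) (length : Int) (n : Int) (stripe_size : Int) (padding : Int) : List (Int × Int × Int) :=
  let length1 := if padding > 0 then length + PySem.Int.mod offset padding else length
  let offset1 := if padding > 0 then offset - PySem.Int.mod offset padding else offset
  let length2 := if padding > 0 then length1 + (padding - PySem.Int.mod length1 padding) else length1
  locateLoop n stripe_size length2.toNat offset1 length2

-- ===== PORT B =====
def locate_alt (offset : Int) (length : Int) (n : Int) (stripe_size : Int) (padding : Int) : List (Int × Int × Int) :=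
  let r := PySem.Int.mod offset padding
  let length1 := if padding > 0 then length + r else length
  let offset1 := if padding > 0 then offset - r else offset
  let length2 := if padding > 0 then length1 + (padding - PySem.Int.mod length1 padding) else length1
  if length2 ≤ 0 then []
  else
    let first := PySem.Int.floordiv offset1 stripe_size
    let last := PySem.Int.floordiv (offset1 + length2 - 1) stripe_size
    (PySem.List.pyRange first (last + 1) 1).map (fun s =>
      let g := max offset1 (s * stripe_size)
      let e := min (offset1 + length2) ((s + 1) * stripe_size)
      (PySem.Int.mod s n,
       (PySem.Int.floordiv g (stripe_size * n)) * stripe_size + PySem.Int.mod g stripe_size,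
       e - g))

-- ===== PRECONDITION & SPEC =====
-- Pre_ is exactly the set of inputs on which A returns: either stripe_size > 0 and n ≠ 0
-- (the loop then terminates and raises nothing), or the padded effective length is ≤ 0
-- (closed form: length + offset % padding < 0 when padding > 0, else length ≤ 0), in which
-- case the loop body never runs.  Outside Pre_ A raises ZeroDivisionError (stripe_size = 0
-- or n = 0) or the while loop never terminates (stripe_size < 0 with positive length).
def Pre_locate (offset : Int) (length : Int) (n : Int) (stripe_size : Int) (padding : Int) : Prop :=
  (0 < stripe_size ∧ n ≠ 0) ∨
    (if 0 < padding then length + PySem.Int.mod offset padding < 0 else length ≤ 0)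
instance (offset : Int) (length : Int) (n : Int) (stripe_size : Int) (padding : Int) : Decidable (Pre_locate offset length n stripe_size padding) := by unfold Pre_locate; infer_instance
def pvWitness_locate : Int × Int × Int × Int × Int := (5, 20, 3, 8, 4)

def Spec_locate (offset : Int) (length : Int) (n : Int) (stripe_size : Int) (padding : Int) (out : List (Int × Int × Int)) : Prop := out = locate_alt offset length n stripe_size padding
instance (offset : Int) (length : Int) (n : Int) (stripe_size : Int) (padding : Int) (out : List (Int × Int × Int)) : Decidable (Spec_locate offset length n stripe_size padding out) := by unfold Spec_locate; infer_instance

-- ===== CLAIM (what is proved, stated in full; the proofs are below) =====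
def Claim_equal_locate : Prop := ∀ (offset : Int) (length : Int) (n : Int) (stripe_size : Int) (padding : Int), Dom_locate offset length n stripe_size padding → Pre_locate offset length n stripe_size padding → Spec_locate offset length n stripe_size padding (locate offset length n stripe_size padding)

-- ===== LEMMAS AND PROOFS =====

-- The chunk emitted for stripe index s, relative to the (padding-adjusted) offset o and end E.
def chunk (n stripe_size o E s : Int) : Int × Int × Int :=
  let g := max o (s * stripe_size)
  let e := min E ((s + 1) * stripe_size)
  (PySem.Int.mod s n,
   (PySem.Int.floordiv g (stripe_size * n)) * stripe_size + PySem.Int.mod g stripe_size,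
   e - g)

theorem locateLoop_eq_map (n ss : Int) (hss : 0 < ss) :
    ∀ (fuel : Nat) (o len : Int), len ≤ (fuel : Int) →
      locateLoop n ss fuel o len =
        if len ≤ 0 then []
        else (PySem.List.pyRange (PySem.Int.floordiv o ss)
                (PySem.Int.floordiv (o + len - 1) ss + 1) 1).map (chunk n ss o (o + len)) := by
  intro fuel
  induction fuel with
  | zero =>
    intro o len hlen
    simp only [locateLoop]
    rw [if_pos (by omega)]
  | succ fuel ih =>
    intro o len hlen
    by_cases hpos : len > 0
    · have hssne : ss ≠ 0 := by omega
      have hmod := PySem.Int.mod_eq_emod_of_pos (a := o) hss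
      have hfd := PySem.Int.floordiv_eq_ediv_of_pos (a := o) hss
      have hmb : 0 ≤ o % ss ∧ o % ss < ss := ⟨Int.emod_nonneg o hssne, Int.emod_lt_of_pos o hss⟩
      have hdm : ss * (o / ss) + o % ss = o := Int.ediv_add_emod o ss
      set first := o / ss with hfirst
      have hl_le : first * ss ≤ o := by nlinarith [hdm]
      have hl_lt : o < (first + 1) * ss := by nlinarith [hdm]
      simp only [locateLoop, if_pos hpos, hmod, hfd]
      set m := ss - o % ss with hm
      have hm1 : 1 ≤ m := by omega
      rw [if_neg (by omega)]
      by_cases hcase : len ≤ m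
      · -- single chunk: last = first
        have hlast : PySem.Int.floordiv (o + len - 1) ss = first := by
          rw [PySem.Int.floordiv_eq_iff_of_pos hss]
          constructor <;> nlinarith [hdm]
        have hmin : min m len = len := by omega
        rw [hmin]
        have hstop : locateLoop n ss fuel (o + len) (len - len) = [] := by
          have := ih (o + len) (len - len) (by omega)
          rw [this, if_pos (by omega)]
        rw [hstop, hlast, PySem.List.pyRange_one_cons (by omega),
            PySem.List.pyRange_one_eq_nil (by omega)]
        simp only [List.map_cons, List.map_nil, chunk]
        have hg : max o (first * ss) = o := by omega
        have he : min (o + len) ((first + 1) * ss) = o + len := by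
          have : o + len ≤ (first + 1) * ss := by nlinarith [hdm]
          omega
        rw [hg, he]
        simp [hmod]
      · -- first chunk is partial up to the boundary, then recurse from the boundary
        have hmin : min m len = m := by omega
        rw [hmin]
        have hbound : o + m = (first + 1) * ss := by nlinarith [hdm]
        have ihr := ih (o + m) (len - m) (by omega)
        rw [ihr, if_neg (by omega)]
        have hfd2 : PySem.Int.floordiv (o + m) ss = first + 1 := by
          rw [PySem.Int.floordiv_eq_iff_of_pos hss]
          constructor <;> nlinarith
        have hE : o + m + (len - m) = o + len := by ring
        rw [hfd2, hE]
        have hlast_ge : first + 1 ≤ PySem.Int.floordiv (o + len - 1) ss := by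
          rw [PySem.Int.le_floordiv_iff_mul_le hss]
          nlinarith
        conv_rhs => rw [PySem.List.pyRange_one_cons (show first < PySem.Int.floordiv (o + len - 1) ss + 1 by omega)]
        simp only [List.map_cons]
        congr 1
        · -- head chunk
          have hg : max o (first * ss) = o := by omega
          have he : min (o + len) ((first + 1) * ss) = (first + 1) * ss := by
            have : (first + 1) * ss ≤ o + len := by omega
            omega
          simp only [chunk, hg, he, hmod, Prod.mk.injEq]
          refine ⟨trivial, trivial, by omega⟩
        · -- tail: the chunk function agrees for s ≥ first + 1
          apply List.map_congr_left
          intro s hs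
          have hsge : first + 1 ≤ s := (PySem.List.mem_pyRange_one.mp hs).1
          simp only [chunk]
          have hmul : (first + 1) * ss ≤ s * ss := by nlinarith
          have hg1 : max (o + m) (s * ss) = s * ss := max_eq_right (by omega)
          have hg2 : max o (s * ss) = s * ss := max_eq_right (by omega)
          rw [hg1, hg2]
    · simp only [locateLoop]
      rw [if_neg hpos, if_pos (by omega)]

-- ===== VERDICT (by name: the statement is the Claim_ definition above) =====
theorem locate_spec : Claim_equal_locate := by
  intro offset length n stripe_size padding _hdom hpre
  unfold Spec_locate locate locate_alt
  simp only
  set length1 := if padding > 0 then length + PySem.Int.mod offset padding else length with h1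
  set offset1 := if padding > 0 then offset - PySem.Int.mod offset padding else offset with h2
  set length2 := if padding > 0 then length1 + (padding - PySem.Int.mod length1 padding) else length1 with h3
  rcases hpre with ⟨hss, hn⟩ | htriv
  · rw [locateLoop_eq_map n stripe_size hss length2.toNat offset1 length2 (by omega)]
    rfl
  · -- the padded length is ≤ 0: the loop body never runs and both sides return []
    have h2le : length2 ≤ 0 := by
      by_cases hp : 0 < padding
      · rw [if_pos hp] at htriv
        have hl1 : length1 < 0 := by rw [h1, if_pos hp]; exact htriv
        have hmodp : PySem.Int.mod length1 padding = length1 % padding :=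
          PySem.Int.mod_eq_emod_of_pos hp
        have hq : length1 / padding < 0 := Int.ediv_neg_of_neg_of_pos hl1 hp
        have hdm : padding * (length1 / padding) + length1 % padding = length1 :=
          Int.ediv_add_emod length1 padding
        have : length2 = padding * (length1 / padding + 1) := by
          rw [h3, if_pos hp, hmodp]; ring_nf; nlinarith [hdm]
        nlinarith
      · rw [if_neg hp] at htriv
        rw [h3, if_neg hp, h1, if_neg hp]; exact htriv
    have hz : length2.toNat = 0 := by omega
    rw [hz, if_pos h2le]
    rfl
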